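-- pv_equiv track=rewrite | github.com/power080900/coding_prac | LV1/Take_out_box.py | solution
-- ===== SOURCE A (Python) =====
-- def solution(n, w, num):
--     warehouse = []
--     stack = []
--
--     for i in range(n):
--         if len(warehouse) % 2 == 0:
--             stack.append(i + 1)
--         else:
--             stack.insert(0, i + 1)
--
--         if len(stack) == w:
--             warehouse.append(stack)
--             stack = []
--
--     if stack:
--         while len(stack) < w:
--             if len(warehouse) % 2 == 0:
--                 stack.append(0)
--             else:
--                 stack.insert(0, 0)
--         warehouse.append(stack)
--
--     for i in range(len(warehouse)):
--         for j, value in enumerate(warehouse[i]):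
--             if value == num:
--                 if warehouse[-1][j] == 0:
--                     return len(warehouse) - i - 1
--                 return len(warehouse) - i
-- ===== SOURCE B (Python) =====
-- def solution(n, w, num):
--     # O(1) arithmetic: locate box num in the snake-ordered warehouse directly.
--     if num < 1 or num > n:
--         return None
--     full, rem = divmod(n, w)
--     rows = full + (1 if rem else 0)
--     r, t = divmod(num - 1, w)
--     col = t if r % 2 == 0 else w - 1 - t
--     if rem == 0 or (col < rem if full % 2 == 0 else col >= w - rem):
--         return rows - r
--     return rows - r - 1
-- ===== Notes on version B (the rewrite author's own statement) =====
-- stated objective: faster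
-- what changed: B replaces A's O(n + w) simulation (building the snake-ordered padded warehouse row by row and scanning it for num) with O(1) closed-form arithmetic: row = (num-1)//w, parity-based column, and a direct comparison against the padded last row's occupancy; Pre_ excludes only nonpositive widths w <= 0 with an existing box (1 <= num <= n), where A's flush condition never fires and its answer (depth 1) is an accident of the simulation while B's division by w is meaningless there.
-- intended difference: When num = 0 and the last row is padded (0 < n, 0 < w, w does not divide n), A finds its own padding sentinel 0 in the warehouse and returns its depth 0, while B returns None because box 0 never exists; B's value is the intended one. — e.g. on solution(3, 2, 0): A returns some 0, B returns none
-- outside the precondition, e.g. on solution(5, 0, 3): A returns 1, B raises ZeroDivisionError; on solution(5, -2, 3): A returns 1, B returns -2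
import Mathlib
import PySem

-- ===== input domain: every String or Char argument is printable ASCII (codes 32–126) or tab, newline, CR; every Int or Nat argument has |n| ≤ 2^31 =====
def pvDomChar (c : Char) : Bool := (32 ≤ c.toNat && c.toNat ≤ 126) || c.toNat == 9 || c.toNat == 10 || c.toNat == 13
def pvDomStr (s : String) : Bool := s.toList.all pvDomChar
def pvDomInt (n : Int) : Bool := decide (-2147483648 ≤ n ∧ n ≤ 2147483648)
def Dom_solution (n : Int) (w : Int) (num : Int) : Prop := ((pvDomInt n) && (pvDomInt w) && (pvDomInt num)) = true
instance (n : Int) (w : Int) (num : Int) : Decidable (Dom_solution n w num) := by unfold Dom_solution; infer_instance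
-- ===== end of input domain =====

-- B replaces A's O(n + w) snake-warehouse simulation by O(1) arithmetic on row/column
-- indices; on the corner num = 0 with a padded last row (see D_solution) B returns the
-- intended "not found" instead of A's accidental depth of a padding sentinel.

-- ===== PORT A =====
-- one iteration of A's building loop: push i+1 (direction by warehouse parity), flush
-- the stack into the warehouse when it reaches width w.  The stack is held in reverse
-- (Python's O(1) list.append = cons here, insert(0, x) = append here), the warehouse is
-- held reversed as well (flush = cons; it is put back in order once, after the loop),
-- and the two list lengths are carried alongside, mirroring CPython's O(1) len(); the
-- values computed are exactly A's.
def buildStep (w : Int) (st : (List (List Int) × Int) × (List Int × Int)) (i : Int) :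
    (List (List Int) × Int) × (List Int × Int) :=
  let stack := if PySem.Int.mod st.1.2 2 = 0 then (i + 1) :: st.2.1 else st.2.1 ++ [i + 1]
  let slen := st.2.2 + 1
  if slen = w then ((stack.reverse :: st.1.1, st.1.2 + 1), ([], 0))
  else (st.1, (stack, slen))

-- A's `while len(stack) < w` padding loop, fuel-encoded so the kernel can reduce it:
-- each pass grows the stack by one, so (w - len(stack)).toNat passes always suffice.
-- Same reversed-stack/length-counter representation; whLen = len(warehouse), unchanged
-- during the loop.
def padGo (w whLen : Int) : Nat → List Int × Int → List Int
  | 0, st => st.1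
  | d + 1, st =>
    if st.2 < w then
      padGo w whLen d (if PySem.Int.mod whLen 2 = 0 then ((0 : Int) :: st.1, st.2 + 1)
        else (st.1 ++ [0], st.2 + 1))
    else st.1

def padLoop (w whLen : Int) (stack : List Int) (slen : Int) : List Int :=
  padGo w whLen (w - slen).toNat (stack, slen)

-- A's inner `for j, value in enumerate(warehouse[i])` loop; last? = warehouse[-1]
-- (the index j is always in range of warehouse[-1] whenever the branch is reached)
def searchRow (num : Int) (last? : Option (List Int)) (tot i : Int) : List Int → Nat → Option Int
  | [], _ => none
  | v :: rest, j =>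
    if v = num then
      if last?.bind (fun l => PySem.List.pyGet? l (j : Int)) = some 0 then some (tot - i - 1)
      else some (tot - i)
    else searchRow num last? tot i rest (j + 1)

-- A's outer `for i in range(len(warehouse))` loop
def searchWh (num tot : Int) (last? : Option (List Int)) : Int → List (List Int) → Option Int
  | _, [] => none
  | i, row :: rest =>
    match searchRow num last? tot i row 0 with
    | some d => some d
    | none => searchWh num tot last? (i + 1) rest

def solution (n : Int) (w : Int) (num : Int) : Option Int :=
  let st := (PySem.List.pyRange 0 n 1).foldl (buildStep w) (([], 0), ([], 0))
  let wh := (if st.2.1 = [] then st.1.1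
    else (padLoop w st.1.2 st.2.1 st.2.2).reverse :: st.1.1).reverse
  searchWh num (PySem.List.len wh) (PySem.List.pyGet? wh (-1)) 0 wh

-- ===== PORT B =====
def solution_alt (n : Int) (w : Int) (num : Int) : Option Int :=
  if num < 1 ∨ n < num then none
  else
    let full := PySem.Int.floordiv n w
    let rem := PySem.Int.mod n w
    let rows := full + (if rem = 0 then 0 else 1)
    let r := PySem.Int.floordiv (num - 1) w
    let t := PySem.Int.mod (num - 1) w
    let col := if PySem.Int.mod r 2 = 0 then t else w - 1 - t
    if rem = 0 ∨ (if PySem.Int.mod full 2 = 0 then col < rem else w - rem ≤ col)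
    then some (rows - r)
    else some (rows - r - 1)

-- ===== PRECONDITION & SPEC =====
-- Pre_ excludes nonpositive widths w ≤ 0 when box num exists (1 ≤ num ≤ n): there A's
-- flush condition `len(stack) == w` can never fire, so the whole stock is kept in one
-- unflushed row and A reports depth 1 for every existing box — an accident of the
-- simulation; B's row/column arithmetic divides by w and is meaningless (or raising,
-- for w = 0) there.  When num does not exist both agree on none, so those inputs stay in.
def Pre_solution (n : Int) (w : Int) (num : Int) : Prop := 0 < w ∨ num < 1 ∨ n < num
instance (n : Int) (w : Int) (num : Int) : Decidable (Pre_solution n w num) := by unfold Pre_solution; infer_instance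

def pvWitness_solution : Int × Int × Int := (7, 3, 5)

-- When num = 0 and the last row is padded (0 < n, 0 < w, w ∤ n), A finds its own padding
-- sentinel 0 and returns its depth 0, while B returns none ("box 0 does not exist"),
-- which is the intended behaviour: 0 is never a box number, only A's filler value.
def D_solution (n : Int) (w : Int) (num : Int) : Prop := 0 < n ∧ 0 < w ∧ num = 0 ∧ ¬ (w ∣ n)
instance (n : Int) (w : Int) (num : Int) : Decidable (D_solution n w num) := by unfold D_solution; infer_instance

def Spec_solution (n : Int) (w : Int) (num : Int) (out : Option Int) : Prop := ¬ D_solution n w num → out = solution_alt n w num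
instance (n : Int) (w : Int) (num : Int) (out : Option Int) : Decidable (Spec_solution n w num out) := by unfold Spec_solution; infer_instance

def pvDiffWitness_solution : Int × Int × Int := (3, 2, 0)
def pvDiffWitnessOut_solution : (Option Int) × (Option Int) := (some 0, none)

-- ===== CLAIM (what is proved, stated in full; the proofs are below) =====
def Claim_unchanged_solution : Prop := ∀ (n : Int) (w : Int) (num : Int), Dom_solution n w num → Pre_solution n w num → Spec_solution n w num (solution n w num)
def Claim_changed_solution : Prop := Dom_solution (pvDiffWitness_solution.1) (pvDiffWitness_solution.2.1) (pvDiffWitness_solution.2.2) ∧ Pre_solution (pvDiffWitness_solution.1) (pvDiffWitness_solution.2.1) (pvDiffWitness_solution.2.2) ∧ D_solution (pvDiffWitness_solution.1) (pvDiffWitness_solution.2.1) (pvDiffWitness_solution.2.2) ∧ solution (pvDiffWitness_solution.1) (pvDiffWitness_solution.2.1) (pvDiffWitness_solution.2.2) = pvDiffWitnessOut_solution.1 ∧ solution_alt (pvDiffWitness_solution.1) (pvDiffWitness_solution.2.1) (pvDiffWitness_solution.2.2) = pvDiffWitnessOut_solution.2 ∧ pvDiffWitnessOut_solution.1 ≠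 pvDiffWitnessOut_solution.2
def Claim_exact_solution : Prop := ∀ (n : Int) (w : Int) (num : Int), Dom_solution n w num → Pre_solution n w num → D_solution n w num → solution n w num ≠ solution_alt n w num

-- ===== LEMMAS AND PROOFS =====

-- the ascending k-prefix of row r (box numbers r*w+1 .. r*w+k)
def ascRow (w r k : Nat) : List Int := (List.range k).map (fun j => ((r * w + j : Nat) : Int) + 1)

-- a completed row r of the warehouse
def snakeRow (w r : Nat) : List Int := if r % 2 = 0 then ascRow w r w else (ascRow w r w).reverse

-- the (reversed) stack while row f has k boxes
def stk (w f k : Nat) : List Int := if f % 2 = 0 then (ascRow w f k).reverse else ascRow w f k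

lemma length_ascRow (w r k : Nat) : (ascRow w r k).length = k := by simp [ascRow]

lemma mem_ascRow {x : Int} {w r k : Nat} : x ∈ ascRow w r k ↔ ∃ j, j < k ∧ x = ((r * w + j : Nat) : Int) + 1 := by
  simp [ascRow, List.mem_map, List.mem_range, eq_comm]

lemma ascRow_succ (w r k : Nat) : ascRow w r (k + 1) = ascRow w r k ++ [((r * w + k : Nat) : Int) + 1] := by
  simp [ascRow, List.range_succ]

-- decomposition of an ascending row at position t
lemma ascRow_decomp (w r k t : Nat) (h : t < k) :
    ascRow w r k = ascRow w r t ++ (((r * w + t : Nat) : Int) + 1) ::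
      (List.range (k - t - 1)).map (fun j => ((r * w + (t + 1 + j) : Nat) : Int) + 1) := by
  have hk : k = (t + 1) + (k - t - 1) := by omega
  rw [ascRow, hk, List.range_add, List.range_succ]
  simp [ascRow, Function.comp_def]
  have h2 : t + 1 + (k - t - 1) - t - 1 = k - t - 1 := by omega
  rw [h2]


lemma build_inv (w' : Nat) (hw : 0 < w') (m : Nat) :
    (List.range m).foldl (fun st (i : Nat) => buildStep (w' : Int) st (i : Int)) ((([], 0), ([], 0)) : (List (List Int) × Int) × (List Int × Int))
      = ((((List.range (m / w')).map (snakeRow w')).reverse, ((m / w' : Nat) : Int)), (stk w' (m / w') (m % w'), ((m % w' : Nat) : Int))) := by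
  induction m with
  | zero => simp [stk, ascRow]
  | succ m ih =>
    rw [List.range_succ, List.foldl_append, ih]
    simp only [List.foldl_cons, List.foldl_nil, buildStep]
    have hk : m % w' < w' := Nat.mod_lt _ hw
    have hm : (m / w') * w' + m % w' = m := by rw [Nat.mul_comm]; exact Nat.div_add_mod m w'
    have hcomm : w' * (m / w') = (m / w') * w' := Nat.mul_comm _ _
    have hmodc : PySem.Int.mod ((m / w' : Nat) : Int) 2 = (((m / w') % 2 : Nat) : Int) := by
      exact_mod_cast PySem.Int.mod_natCast (m / w') 2
    have hval : (((m / w') * w' + m % w' : Nat) : Int) + 1 = (m : Int) + 1 := by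
      rw [hm]
    by_cases hpar : (m / w') % 2 = 0
    · have hstk : stk w' (m / w') (m % w') = (ascRow w' (m / w') (m % w')).reverse := by
        simp only [stk, if_pos hpar]
      have hc2 : PySem.Int.mod ((m / w' : Nat) : Int) 2 = 0 := by
        rw [hmodc]; exact_mod_cast hpar
      rw [hstk, if_pos hc2]
      have hstack : ((m : Int) + 1) :: (ascRow w' (m / w') (m % w')).reverse = (ascRow w' (m / w') (m % w' + 1)).reverse := by
        rw [ascRow_succ, hval]; simp
      rw [hstack]
      by_cases hfull : m % w' + 1 = w'
      · rw [if_pos (by push_cast; exact_mod_cast congrArg (Nat.cast : Nat → Int) hfull)]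
        have h1 : m + 1 = w' * (m / w' + 1) := by rw [Nat.mul_succ, hcomm]; omega
        have hdiv : (m + 1) / w' = m / w' + 1 := by rw [h1, Nat.mul_div_cancel_left _ hw]
        have hmd : (m + 1) % w' = 0 := by rw [h1, Nat.mul_mod_right]
        rw [hdiv, hmd]
        simp only [Prod.mk.injEq]
        refine ⟨⟨?_, by push_cast; ring⟩, by simp [stk, ascRow], by simp⟩
        rw [List.range_succ]
        simp only [List.map_append, List.map_cons, List.map_nil, snakeRow, if_pos hpar, hfull,
          List.reverse_reverse, List.reverse_append, List.reverse_cons, List.reverse_nil,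
          List.nil_append, List.singleton_append]
      · rw [if_neg (by
          intro hcon
          apply hfull
          have : ((m % w' + 1 : Nat) : Int) = ((w' : Nat) : Int) := by push_cast; omega
          exact_mod_cast this)]
        have h1 : m + 1 = w' * (m / w') + (m % w' + 1) := by rw [hcomm]; omega
        have hdiv : (m + 1) / w' = m / w' := by
          rw [h1, Nat.mul_add_div hw,
            Nat.div_eq_of_lt (show m % w' + 1 < w' by omega), Nat.add_zero]
        have hmd : (m + 1) % w' = m % w' + 1 := by
          rw [h1, Nat.mul_add_mod, Nat.mod_eq_of_lt (show m % w' + 1 < w' by omega)]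
        rw [hdiv, hmd]
        simp only [Prod.mk.injEq, stk, if_pos hpar, true_and, and_true]
        push_cast
        ring
    · have hstk : stk w' (m / w') (m % w') = ascRow w' (m / w') (m % w') := by
        simp only [stk, if_neg hpar]
      have hc2 : ¬ PySem.Int.mod ((m / w' : Nat) : Int) 2 = 0 := by
        rw [hmodc]; exact fun h => hpar (by exact_mod_cast h)
      rw [hstk, if_neg hc2]
      have hstack : ascRow w' (m / w') (m % w') ++ [(m : Int) + 1] = ascRow w' (m / w') (m % w' + 1) := by
        rw [ascRow_succ, hval]
      rw [hstack]
      by_cases hfull : m % w' + 1 = w'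
      · rw [if_pos (by push_cast; exact_mod_cast congrArg (Nat.cast : Nat → Int) hfull)]
        have h1 : m + 1 = w' * (m / w' + 1) := by rw [Nat.mul_succ, hcomm]; omega
        have hdiv : (m + 1) / w' = m / w' + 1 := by rw [h1, Nat.mul_div_cancel_left _ hw]
        have hmd : (m + 1) % w' = 0 := by rw [h1, Nat.mul_mod_right]
        rw [hdiv, hmd]
        simp only [Prod.mk.injEq]
        refine ⟨⟨?_, by push_cast; ring⟩, by simp [stk, ascRow], by simp⟩
        rw [List.range_succ]
        simp only [List.map_append, List.map_cons, List.map_nil, snakeRow, if_neg hpar, hfull,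
          List.reverse_append, List.reverse_cons, List.reverse_nil, List.nil_append,
          List.singleton_append]
      · rw [if_neg (by
          intro hcon
          apply hfull
          have : ((m % w' + 1 : Nat) : Int) = ((w' : Nat) : Int) := by push_cast; omega
          exact_mod_cast this)]
        have h1 : m + 1 = w' * (m / w') + (m % w' + 1) := by rw [hcomm]; omega
        have hdiv : (m + 1) / w' = m / w' := by
          rw [h1, Nat.mul_add_div hw,
            Nat.div_eq_of_lt (show m % w' + 1 < w' by omega), Nat.add_zero]
        have hmd : (m + 1) % w' = m % w' + 1 := by
          rw [h1, Nat.mul_add_mod, Nat.mod_eq_of_lt (show m % w' + 1 < w' by omega)]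
        rw [hdiv, hmd]
        simp only [Prod.mk.injEq, stk, if_neg hpar, true_and, and_true]
        push_cast
        ring

lemma build_nopos (w : Int) (hw : w ≤ 0) (m : Nat) :
    (List.range m).foldl (fun st (i : Nat) => buildStep w st (i : Int)) ((([], 0), ([], 0)) : (List (List Int) × Int) × (List Int × Int))
      = ((([], 0)), ((ascRow 1 0 m).reverse, (m : Int))) := by
  induction m with
  | zero => simp [ascRow]
  | succ m ih =>
    rw [List.range_succ, List.foldl_append, ih]
    simp only [List.foldl_cons, List.foldl_nil, buildStep]
    have hc1 : PySem.Int.mod (0 : Int) 2 = 0 := by decide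
    rw [if_pos hc1]
    rw [if_neg (by intro hcon; omega)]
    have : ((m : Int) + 1) :: (ascRow 1 0 m).reverse = (ascRow 1 0 (m + 1)).reverse := by
      rw [ascRow_succ]; norm_num
    rw [this]
    simp

lemma padLoop_done (w whLen slen : Int) (S : List Int) (h : ¬ slen < w) :
    padLoop w whLen S slen = S := by
  have : (w - slen).toNat = 0 := by omega
  rw [padLoop, this, padGo]

lemma padLoop_eq (w' : Nat) (whLen : Int) (d : Nat) : ∀ (S : List Int), S.length + d = w' →
    padLoop (w' : Int) whLen S (S.length : Int) =
      if PySem.Int.mod whLen 2 = 0 then List.replicate d 0 ++ S else S ++ List.replicate d 0 := by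
  induction d with
  | zero =>
    intro S hS
    rw [padLoop]
    have : ((w' : Int) - S.length).toNat = 0 := by omega
    rw [this, padGo]
    split <;> simp
  | succ d ih =>
    intro S hS
    have hfuel : ((w' : Int) - S.length).toNat = d + 1 := by omega
    rw [padLoop, hfuel, padGo, if_pos (by simp; omega)]
    split
    · have := ih ((0 : Int) :: S) (by simp; omega)
      rw [padLoop] at this
      have hf2 : ((w' : Int) - ((0 : Int) :: S).length).toNat = d := by simp; omega
      rw [hf2] at this
      have hc : ((0 : Int) :: S, (S.length : Int) + 1) = ((0 : Int) :: S, (((0 : Int) :: S).length : Int)) := by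
        simp
      rw [hc, this, if_pos ‹_›]
      rw [show (0 : Int) :: S = [0] ++ S from rfl, ← List.append_assoc, ← List.replicate_succ',
        List.replicate_succ]
    · have := ih (S ++ [0]) (by simp; omega)
      rw [padLoop] at this
      have hf2 : ((w' : Int) - (S ++ [(0 : Int)]).length).toNat = d := by simp; omega
      rw [hf2] at this
      have hc : (S ++ [(0 : Int)], (S.length : Int) + 1) = (S ++ [(0 : Int)], ((S ++ [(0 : Int)]).length : Int)) := by
        simp
      rw [hc, this, if_neg ‹_›]
      rw [List.replicate_succ', List.append_assoc]
      simp only [List.singleton_append]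
      rw [← List.replicate_succ, List.replicate_succ']

lemma searchRow_none (num : Int) (last? : Option (List Int)) (tot i : Int) (row : List Int) (j : Nat)
    (h : num ∉ row) : searchRow num last? tot i row j = none := by
  induction row generalizing j with
  | nil => rfl
  | cons v rest ih =>
    simp only [List.mem_cons, not_or] at h
    rw [searchRow]
    rw [if_neg (fun hv => h.1 hv.symm)]
    exact ih (j+1) h.2

lemma searchRow_found (num : Int) (last? : Option (List Int)) (tot i : Int) (pre post : List Int) (j : Nat)
    (h : num ∉ pre) :
    searchRow num last? tot i (pre ++ num :: post) j =
      if last?.bind (fun l => PySem.List.pyGet? l ((j + pre.length : Nat) : Int)) = some 0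
      then some (tot - i - 1) else some (tot - i) := by
  induction pre generalizing j with
  | nil =>
    rw [List.nil_append, searchRow, if_pos rfl]
    simp
  | cons a pre' ih =>
    by_cases ha : a = num
    · exact absurd (ha ▸ List.mem_cons_self) h
    · rw [List.cons_append, searchRow, if_neg ha,
        ih (j + 1) (fun hx => h (List.mem_cons_of_mem a hx))]
      have : j + 1 + pre'.length = j + (a :: pre').length := by simp; omega
      rw [this]


lemma searchWh_skip (num tot : Int) (last? : Option (List Int)) (i : Int) (row : List Int)
    (rest : List (List Int)) (h : num ∉ row) :
    searchWh num tot last? i (row :: rest) = searchWh num tot last? (i + 1) rest := by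
  rw [searchWh, searchRow_none _ _ _ _ _ _ h]

lemma searchWh_skip_rows (num tot : Int) (last? : Option (List Int)) (rows tail : List (List Int))
    (i : Int) (h : ∀ row ∈ rows, num ∉ row) :
    searchWh num tot last? i (rows ++ tail) = searchWh num tot last? (i + rows.length) tail := by
  induction rows generalizing i with
  | nil => simp
  | cons row rest ih =>
    rw [List.cons_append, searchWh_skip _ _ _ _ _ _ (h row (by simp)), ih _ (fun r hr => h r (by simp [hr]))]
    congr 1; simp; ring


-- ---- proof-side description of the finished warehouse ----

def snakeIdx (w r t : Nat) : Nat := if r % 2 = 0 then t else w - 1 - t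

def padRow (w f k : Nat) : List Int :=
  if f % 2 = 0 then ascRow w f k ++ List.replicate (w - k) 0
  else List.replicate (w - k) 0 ++ (ascRow w f k).reverse

def warehouseOf (w' n' : Nat) : List (List Int) :=
  if n' % w' = 0 then (List.range (n' / w')).map (snakeRow w')
  else (List.range (n' / w')).map (snakeRow w') ++ [padRow w' (n' / w') (n' % w')]

def zeroAt (w' f0 k0 j : Nat) : Bool :=
  if k0 = 0 then false else if f0 % 2 = 0 then decide (k0 ≤ j) else decide (j < w' - k0)

def outVal (w' f0 k0 r j : Nat) : Option Int :=
  some (((f0 + (if k0 = 0 then 0 else 1) : Nat) : Int) - (r : Int) - (if zeroAt w' f0 k0 j then 1 else 0))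

lemma stk_zero (w f : Nat) : stk w f 0 = [] := by
  simp [stk, ascRow]

lemma length_stk (w f k : Nat) : (stk w f k).length = k := by
  unfold stk; split <;> simp [length_ascRow]

lemma length_snakeRow (w r : Nat) : (snakeRow w r).length = w := by
  unfold snakeRow; split <;> simp [length_ascRow]

lemma mem_snakeRow {x : Int} {w r : Nat} :
    x ∈ snakeRow w r ↔ ∃ j, j < w ∧ x = ((r * w + j : Nat) : Int) + 1 := by
  unfold snakeRow; split <;> simp [mem_ascRow]

lemma pos_of_mem_snakeRow {x : Int} {w r : Nat} (h : x ∈ snakeRow w r) : 0 < x := by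
  obtain ⟨j, -, rfl⟩ := mem_snakeRow.mp h
  positivity

lemma ascRow_getElem? (w r k t : Nat) (h : t < k) :
    (ascRow w r k)[t]? = some (((r * w + t : Nat) : Int) + 1) := by
  simp [ascRow, List.getElem?_map, List.getElem?_range, h]

lemma rowcol_div (w r t : Nat) (hw : 0 < w) (ht : t < w) : (r * w + t) / w = r := by
  rw [Nat.mul_comm, Nat.mul_add_div hw, Nat.div_eq_of_lt ht, Nat.add_zero]

lemma rowcol_mod (w r t : Nat) (ht : t < w) : (r * w + t) % w = t := by
  rw [Nat.mul_comm, Nat.mul_add_mod, Nat.mod_eq_of_lt ht]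

lemma notmem_snakeRow (w r t r' : Nat) (hw : 0 < w) (ht : t < w) (hne : r' ≠ r) :
    (((r * w + t : Nat) : Int) + 1) ∉ snakeRow w r' := by
  intro hmem
  obtain ⟨j, hj, hx⟩ := mem_snakeRow.mp hmem
  have heq : r * w + t = r' * w + j := by exact_mod_cast (by omega : ((r * w + t : Nat) : Int) = ((r' * w + j : Nat) : Int))
  have h3 : (r * w + t) / w = (r' * w + j) / w := by rw [heq]
  rw [rowcol_div w r t hw ht, rowcol_div w r' j hw hj] at h3
  subst h3
  omega

-- the warehouse produced by A's building + padding phase, for n = ↑n', w = ↑w'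
lemma solution_eq_search (w' n' : Nat) (hw : 0 < w') (num : Int) :
    solution (n' : Int) (w' : Int) num =
      searchWh num (PySem.List.len (warehouseOf w' n'))
        (PySem.List.pyGet? (warehouseOf w' n') (-1)) 0 (warehouseOf w' n') := by
  simp only [solution]
  rw [PySem.List.pyRange_zero, Int.toNat_natCast, List.foldl_map, build_inv w' hw n']
  by_cases hk : n' % w' = 0
  · rw [hk, stk_zero]
    rw [warehouseOf, if_pos hk]
    simp only [ite_true, if_pos trivial, List.reverse_reverse]
  · have hkw : n' % w' < w' := Nat.mod_lt _ hw
    have hne : stk w' (n' / w') (n' % w') ≠ [] := by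
      intro h
      have := length_stk w' (n' / w') (n' % w')
      rw [h] at this
      simp at this
      omega
    rw [if_neg hne, warehouseOf, if_neg hk]
    have hlen : ((n' % w' : Nat) : Int) = ((stk w' (n' / w') (n' % w')).length : Int) := by
      rw [length_stk]
    have hpad : (padLoop (w' : Int) ((n' / w' : Nat) : Int) (stk w' (n' / w') (n' % w'))
        ((n' % w' : Nat) : Int)).reverse = padRow w' (n' / w') (n' % w') := by
      rw [hlen, padLoop_eq w' _ (w' - n' % w') _ (by rw [length_stk]; omega)]
      have hmodc : PySem.Int.mod ((n' / w' : Nat) : Int) 2 = (((n' / w') % 2 : Nat) : Int) := by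
        exact_mod_cast PySem.Int.mod_natCast (n' / w') 2
      by_cases hpar : (n' / w') % 2 = 0
      · rw [if_pos (by rw [hmodc]; exact_mod_cast hpar), padRow, if_pos hpar, stk, if_pos hpar]
        simp
      · rw [if_neg (by rw [hmodc]; exact fun h => hpar (by exact_mod_cast h)), padRow, if_neg hpar,
          stk, if_neg hpar]
        simp
    rw [hpad]
    simp only [List.reverse_cons, List.reverse_reverse]

lemma len_warehouseOf (w' n' : Nat) (hw : 0 < w') :
    PySem.List.len (warehouseOf w' n') = ((n' / w' + (if n' % w' = 0 then 0 else 1) : Nat) : Int) := by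
  unfold warehouseOf
  split <;> simp [PySem.List.len]

-- elements of the padded last row
lemma padRow_get_zero (w f k j : Nat) (hk : 0 < k) (hkw : k < w) (hj : j < w)
    (hz : if f % 2 = 0 then k ≤ j else j < w - k) :
    (padRow w f k)[j]? = some 0 := by
  unfold padRow
  split
  · rename_i hpar
    rw [if_pos hpar] at hz
    rw [List.getElem?_append_right (by rw [length_ascRow]; omega)]
    rw [length_ascRow, List.getElem?_replicate]
    rw [if_pos (by omega)]
  · rename_i hpar
    rw [if_neg hpar] at hz
    rw [List.getElem?_append_left (by simp; omega), List.getElem?_replicate, if_pos hz]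

lemma padRow_get_pos (w f k j : Nat) (hk : 0 < k) (hkw : k < w) (hj : j < w)
    (hz : ¬ (if f % 2 = 0 then k ≤ j else j < w - k)) :
    ∃ v, (padRow w f k)[j]? = some v ∧ 0 < v := by
  unfold padRow
  split
  · rename_i hpar
    rw [if_pos hpar] at hz
    rw [List.getElem?_append_left (by rw [length_ascRow]; omega), ascRow_getElem? _ _ _ _ (by omega)]
    exact ⟨_, rfl, by positivity⟩
  · rename_i hpar
    rw [if_neg hpar] at hz
    rw [List.getElem?_append_right (by simp; omega)]
    have hlen : (List.replicate (w - k) (0 : Int)).length = w - k := by simp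
    rw [hlen, List.getElem?_reverse (by rw [length_ascRow]; omega), length_ascRow,
      ascRow_getElem? _ _ _ _ (by omega)]
    exact ⟨_, rfl, by positivity⟩

-- where num = ↑(r*w'+t)+1 sits inside its row, as a pre ++ num :: post split
lemma snakeRow_split (w r t : Nat) (hw : 0 < w) (ht : t < w) :
    ∃ pre post, snakeRow w r = pre ++ (((r * w + t : Nat) : Int) + 1) :: post ∧
      (((r * w + t : Nat) : Int) + 1) ∉ pre ∧ pre.length = snakeIdx w r t := by
  have hdec := ascRow_decomp w r w t ht
  unfold snakeRow snakeIdx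
  split
  · refine ⟨ascRow w r t, _, hdec, ?_, length_ascRow _ _ _⟩
    intro hmem
    obtain ⟨j, hj, hx⟩ := mem_ascRow.mp hmem
    have : r * w + t = r * w + j := by exact_mod_cast (by omega : ((r * w + t : Nat) : Int) = ((r * w + j : Nat) : Int))
    omega
  · refine ⟨((List.range (w - t - 1)).map (fun j => ((r * w + (t + 1 + j) : Nat) : Int) + 1)).reverse,
      (ascRow w r t).reverse, ?_, ?_, ?_⟩
    · rw [hdec]; simp
    · intro hmem
      rw [List.mem_reverse, List.mem_map] at hmem
      obtain ⟨j, hj, hx⟩ := hmem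
      have : r * w + t = r * w + (t + 1 + j) := by exact_mod_cast (by omega : ((r * w + t : Nat) : Int) = ((r * w + (t + 1 + j) : Nat) : Int))
      omega
    · simp; omega

-- same split for the padded last row, num in the occupied part (t < k)
lemma padRow_split (w f k t : Nat) (hw : 0 < w) (htk : t < k) (hkw : k < w) :
    ∃ pre post, padRow w f k = pre ++ (((f * w + t : Nat) : Int) + 1) :: post ∧
      (((f * w + t : Nat) : Int) + 1) ∉ pre ∧ pre.length = snakeIdx w f t := by
  have hdec := ascRow_decomp w f k t htk
  unfold padRow snakeIdx
  split
  · refine ⟨ascRow w f t,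
      (List.range (k - t - 1)).map (fun j => ((f * w + (t + 1 + j) : Nat) : Int) + 1) ++ List.replicate (w - k) 0,
      by rw [hdec]; simp, ?_, length_ascRow _ _ _⟩
    intro hmem
    obtain ⟨j, hj, hx⟩ := mem_ascRow.mp hmem
    have : f * w + t = f * w + j := by exact_mod_cast (by omega : ((f * w + t : Nat) : Int) = ((f * w + j : Nat) : Int))
    omega
  · refine ⟨List.replicate (w - k) 0 ++ ((List.range (k - t - 1)).map (fun j => ((f * w + (t + 1 + j) : Nat) : Int) + 1)).reverse,
      (ascRow w f t).reverse, ?_, ?_, ?_⟩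
    · rw [hdec]; simp
    · intro hmem
      rw [List.mem_append] at hmem
      rcases hmem with hmem | hmem
      · rw [List.mem_replicate] at hmem
        have := hmem.2
        have : (0:Int) < ((f * w + t : Nat) : Int) + 1 := by positivity
        omega
      · rw [List.mem_reverse, List.mem_map] at hmem
        obtain ⟨j, hj, hx⟩ := hmem
        have : f * w + t = f * w + (t + 1 + j) := by exact_mod_cast (by omega : ((f * w + t : Nat) : Int) = ((f * w + (t + 1 + j) : Nat) : Int))
        omega
    · simp; omega


lemma snakeIdx_lt (w r t : Nat) (hw : 0 < w) (ht : t < w) : snakeIdx w r t < w := by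
  unfold snakeIdx; split <;> omega

lemma row_val_lt (w' n' r j : Nat) (hj : j < w') (hr : r < n' / w') : r * w' + j < n' := by
  have h1 : (r + 1) * w' ≤ (n' / w') * w' := Nat.mul_le_mul_right _ (by omega)
  have h2 : (n' / w') * w' ≤ n' := Nat.div_mul_le_self _ _
  have h3 : (r + 1) * w' = r * w' + w' := by ring
  omega

lemma mem_padRow {x : Int} {w f k : Nat} (h : x ∈ padRow w f k) :
    x = 0 ∨ ∃ j, j < k ∧ x = ((f * w + j : Nat) : Int) + 1 := by
  unfold padRow at h
  split at h <;> rw [List.mem_append] at h <;> rcases h with h | h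
  · exact Or.inr (mem_ascRow.mp h)
  · rw [List.mem_replicate] at h; exact Or.inl h.2
  · rw [List.mem_replicate] at h; exact Or.inl h.2
  · rw [List.mem_reverse] at h; exact Or.inr (mem_ascRow.mp h)

lemma last_warehouseOf (w' n' : Nat) (hw : 0 < w') (hn : 0 < n') :
    PySem.List.pyGet? (warehouseOf w' n') (-1) =
      some (if n' % w' = 0 then snakeRow w' (n' / w' - 1) else padRow w' (n' / w') (n' % w')) := by
  unfold warehouseOf
  by_cases hk : n' % w' = 0
  · rw [if_pos hk, if_pos hk]
    have hf : 0 < n' / w' := by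
      rcases Nat.eq_zero_or_pos (n' / w') with h0 | h
      · have hdm := Nat.div_add_mod n' w'
        rw [h0, Nat.mul_zero] at hdm
        omega
      · exact h
    have : n' / w' = (n' / w' - 1) + 1 := by omega
    rw [this, List.range_succ, List.map_append, List.map_cons, List.map_nil,
      PySem.List.pyGet?_neg_one_append_singleton]
    norm_num
  · rw [if_neg hk, if_neg hk, PySem.List.pyGet?_neg_one_append_singleton]

lemma nonpos_case (n w num : Int) (hn : n ≤ 0) : solution n w num = none := by
  simp only [solution]
  rw [PySem.List.pyRange_zero]
  rw [Int.toNat_of_nonpos hn]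
  simp only [List.range_zero, List.map_nil, List.foldl_nil]
  simp only [ite_true, if_pos trivial]
  rfl

-- w ≤ 0 and 0 < n: the flush never fires and the warehouse is a single row [1, …, n]
lemma noposw_case (n' : Nat) (hn : 0 < n') (w num : Int) (hw : w ≤ 0)
    (hmem : ¬ (1 ≤ num ∧ num ≤ (n' : Int))) :
    solution (n' : Int) w num = none := by
  simp only [solution]
  rw [PySem.List.pyRange_zero, Int.toNat_natCast, List.foldl_map, build_nopos w hw n']
  have hne : ascRow 1 0 n' ≠ [] := by
    intro h
    have := length_ascRow 1 0 n'
    rw [h] at this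
    simp at this
    omega
  rw [if_neg (by simpa using hne)]
  rw [padLoop_done w _ _ _ (by show ¬ ((n' : Nat) : Int) < w; omega)]
  rw [List.reverse_reverse]
  simp only [List.reverse_cons, List.reverse_nil, List.nil_append]
  have hnot : ∀ row ∈ [ascRow 1 0 n'], num ∉ row := by
    intro row hrow hx
    rw [List.mem_singleton] at hrow
    subst hrow
    obtain ⟨j, hj, rfl⟩ := mem_ascRow.mp hx
    apply hmem
    refine ⟨by omega, ?_⟩
    have : 0 * 1 + j < n' := by omega
    omega
  rw [show [ascRow 1 0 n'] = [ascRow 1 0 n'] ++ [] by simp,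
    searchWh_skip_rows _ _ _ _ _ _ hnot]
  rfl

lemma notfound_case (w' n' : Nat) (hw : 0 < w') (hn : 0 < n') (num : Int)
    (h1 : ¬ (1 ≤ num ∧ num ≤ (n' : Int))) (h2 : n' % w' ≠ 0 → num ≠ 0) :
    solution (n' : Int) (w' : Int) num = none := by
  rw [solution_eq_search w' n' hw]
  have hmodn : w' * (n' / w') + n' % w' = n' := Nat.div_add_mod n' w'
  have hcomm : w' * (n' / w') = (n' / w') * w' := Nat.mul_comm _ _
  have hfull : ∀ r < n' / w', num ∉ snakeRow w' r := by
    intro r hr hx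
    obtain ⟨j, hj, rfl⟩ := mem_snakeRow.mp hx
    have := row_val_lt w' n' r j hj hr
    exact h1 ⟨by omega, by omega⟩
  have hnot : ∀ row ∈ warehouseOf w' n', num ∉ row := by
    intro row hrow hx
    unfold warehouseOf at hrow
    by_cases hk : n' % w' = 0
    · rw [if_pos hk] at hrow
      obtain ⟨r, hr, rfl⟩ := List.mem_map.mp hrow
      exact hfull r (List.mem_range.mp hr) hx
    · rw [if_neg hk, List.mem_append] at hrow
      rcases hrow with hrow | hrow
      · obtain ⟨r, hr, rfl⟩ := List.mem_map.mp hrow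
        exact hfull r (List.mem_range.mp hr) hx
      · rw [List.mem_singleton] at hrow
        subst hrow
        rcases mem_padRow hx with rfl | ⟨j, hj, rfl⟩
        · exact h2 hk rfl
        · exact h1 ⟨by omega, by omega⟩
  rw [show warehouseOf w' n' = warehouseOf w' n' ++ [] by simp,
    searchWh_skip_rows _ _ _ _ _ _ hnot]
  rfl

lemma found_case (w' n' r t : Nat) (hw : 0 < w') (ht : t < w') (hlt : r * w' + t < n') :
    solution (n' : Int) (w' : Int) (((r * w' + t : Nat) : Int) + 1) =
      outVal w' (n' / w') (n' % w') r (snakeIdx w' r t) := by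
  rw [solution_eq_search w' n' hw]
  have hn : 0 < n' := by omega
  have hmodn : w' * (n' / w') + n' % w' = n' := Nat.div_add_mod n' w'
  have hcomm : w' * (n' / w') = (n' / w') * w' := Nat.mul_comm _ _
  have hk0 : n' % w' < w' := Nat.mod_lt _ hw
  have hj : snakeIdx w' r t < w' := snakeIdx_lt w' r t hw ht
  have hrle : r ≤ n' / w' := by
    by_contra hcon
    have h1 : (n' / w' + 1) * w' ≤ r * w' := Nat.mul_le_mul_right _ (by omega)
    have he : (n' / w' + 1) * w' = (n' / w') * w' + w' := by ring
    omega
  have hlast := last_warehouseOf w' n' hw hn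
  have hskip : ∀ rr ∈ (List.range r).map (snakeRow w'), (((r * w' + t : Nat) : Int) + 1) ∉ rr := by
    intro rr hrr
    obtain ⟨r2, hr2, rfl⟩ := List.mem_map.mp hrr
    exact notmem_snakeRow w' r t r2 hw ht (by rw [List.mem_range] at hr2; omega)
  by_cases hreq : r = n' / w'
  -- num sits in the padded last row
  · subst hreq
    have hknz : n' % w' ≠ 0 := by omega
    have htk : t < n' % w' := by omega
    rw [if_neg hknz] at hlast
    rw [hlast, len_warehouseOf w' n' hw]
    rw [show warehouseOf w' n' = (List.range (n' / w')).map (snakeRow w') ++ [padRow w' (n' / w') (n' % w')]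
        from by unfold warehouseOf; rw [if_neg hknz]]
    rw [searchWh_skip_rows _ _ _ _ _ _ hskip]
    obtain ⟨pre, post, hrow, hpre, hlen⟩ := padRow_split w' (n' / w') (n' % w') t hw htk hk0
    have hzfalse : ¬ (if (n' / w') % 2 = 0 then n' % w' ≤ snakeIdx w' (n' / w') t
        else snakeIdx w' (n' / w') t < w' - n' % w') := by
      have hsi : snakeIdx w' (n' / w') t = if (n' / w') % 2 = 0 then t else w' - 1 - t := by
        unfold snakeIdx; rfl
      rw [hsi]
      by_cases hp : (n' / w') % 2 = 0
      · rw [if_pos hp, if_pos hp]; omega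
      · rw [if_neg hp, if_neg hp]; omega
    have hsr : ∀ tot i : Int,
        searchRow (((n' / w' * w' + t : Nat) : Int) + 1) (some (padRow w' (n' / w') (n' % w'))) tot i
          (padRow w' (n' / w') (n' % w')) 0 = some (tot - i) := by
      intro tot i
      rw [hrow, searchRow_found _ _ _ _ _ _ _ hpre]
      rw [if_neg (by
        rw [Option.bind_some, PySem.List.pyGet?_natCast]
        rw [show (0 + pre.length : Nat) = snakeIdx w' (n' / w') t by rw [hlen]; omega]
        rw [← hrow]
        obtain ⟨v, hv, hvpos⟩ := padRow_get_pos w' (n' / w') (n' % w') (snakeIdx w' (n' / w') t)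
          (by omega) hk0 hj hzfalse
        rw [hv]
        intro hcon
        have : v = 0 := by injection hcon
        omega)]
    rw [searchWh, hsr]
    simp only [outVal, zeroAt, if_neg hknz]
    have hz2 : (if (n' / w') % 2 = 0 then decide (n' % w' ≤ snakeIdx w' (n' / w') t)
        else decide (snakeIdx w' (n' / w') t < w' - n' % w')) = false := by
      split <;> rename_i hp <;> simp only [decide_eq_false_iff_not]
      · rw [if_pos hp] at hzfalse; exact hzfalse
      · rw [if_neg hp] at hzfalse; exact hzfalse
    simp only [hz2, Bool.false_eq_true, if_false]
    have hlm : (((List.range (n' / w')).map (snakeRow w')).length : Int) = ((n' / w' : Nat) : Int) := by simp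
    rw [hlm]
    congr 1
    push_cast
    ring
  -- num sits in a full row r < n' / w'
  · have hrlt : r < n' / w' := by omega
    obtain ⟨pre, post, hrow, hpre, hlen⟩ := snakeRow_split w' r t hw ht
    have hdecomp : warehouseOf w' n' = (List.range r).map (snakeRow w') ++
        (snakeRow w' r ::
          (((List.range (n' / w' - r - 1)).map (fun j => r + 1 + j)).map (snakeRow w') ++
            (if n' % w' = 0 then [] else [padRow w' (n' / w') (n' % w')]))) := by
      have h1 : List.range (n' / w') = List.range r ++ r :: (List.range (n' / w' - r - 1)).map (fun j => r + 1 + j) := by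
        have h2 : n' / w' = (r + 1) + (n' / w' - r - 1) := by omega
        conv_lhs => rw [h2]
        rw [List.range_add, List.range_succ]
        simp
      unfold warehouseOf
      split <;> rw [h1] <;> simp
    rw [hlast, len_warehouseOf w' n' hw]
    rw [hdecomp, searchWh_skip_rows _ _ _ _ _ _ hskip]
    -- value of the top row at column snakeIdx w' r t
    set LASTROW := (if n' % w' = 0 then snakeRow w' (n' / w' - 1) else padRow w' (n' / w') (n' % w')) with hLR
    by_cases hzero : n' % w' ≠ 0 ∧ (if (n' / w') % 2 = 0 then n' % w' ≤ snakeIdx w' r t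
        else snakeIdx w' r t < w' - n' % w')
    · -- the slot above num in the top row is a padding 0
      have hget : LASTROW[(snakeIdx w' r t)]? = some 0 := by
        rw [hLR, if_neg hzero.1]
        exact padRow_get_zero w' (n' / w') (n' % w') (snakeIdx w' r t)
          (by have := hzero.1; omega) hk0 hj hzero.2
      have hsr : ∀ tot i : Int,
          searchRow (((r * w' + t : Nat) : Int) + 1) (some LASTROW) tot i (snakeRow w' r) 0
            = some (tot - i - 1) := by
        intro tot i
        rw [hrow, searchRow_found _ _ _ _ _ _ _ hpre]
        rw [if_pos (by
          rw [Option.bind_some, PySem.List.pyGet?_natCast,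
            show (0 + pre.length : Nat) = snakeIdx w' r t by rw [hlen]; omega, hget])]
      rw [searchWh, hsr]
      have hlm : (((List.range r).map (snakeRow w')).length : Int) = (r : Int) := by simp
      rw [hlm]
      simp only [outVal, zeroAt]
      have hz2 : (if (n' / w') % 2 = 0 then decide (n' % w' ≤ snakeIdx w' r t)
          else decide (snakeIdx w' r t < w' - n' % w')) = true := by
        have := hzero.2
        split <;> rename_i hp <;> simp only [decide_eq_true_eq]
        · rw [if_pos hp] at this; exact this
        · rw [if_neg hp] at this; exact this
      simp only [hz2, if_neg hzero.1]
      norm_num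
    · -- the slot above num is occupied
      have hget : ∃ v, LASTROW[(snakeIdx w' r t)]? = some v ∧ 0 < v := by
        rw [hLR]
        by_cases hk : n' % w' = 0
        · rw [if_pos hk]
          have hjlen : snakeIdx w' r t < (snakeRow w' (n' / w' - 1)).length := by
            rw [length_snakeRow]; exact hj
          rw [List.getElem?_eq_getElem hjlen]
          exact ⟨_, rfl, pos_of_mem_snakeRow (List.getElem_mem hjlen)⟩
        · rw [if_neg hk]
          exact padRow_get_pos w' (n' / w') (n' % w') (snakeIdx w' r t) (by omega) hk0 hj
            (fun hcontra => hzero ⟨hk, hcontra⟩)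
      obtain ⟨v, hv, hvpos⟩ := hget
      have hsr : ∀ tot i : Int,
          searchRow (((r * w' + t : Nat) : Int) + 1) (some LASTROW) tot i (snakeRow w' r) 0
            = some (tot - i) := by
        intro tot i
        rw [hrow, searchRow_found _ _ _ _ _ _ _ hpre]
        rw [if_neg (by
          rw [Option.bind_some, PySem.List.pyGet?_natCast,
            show (0 + pre.length : Nat) = snakeIdx w' r t by rw [hlen]; omega, hv]
          intro hcon
          have : v = 0 := by injection hcon
          omega)]
      rw [searchWh, hsr]
      have hlm : (((List.range r).map (snakeRow w')).length : Int) = (r : Int) := by simp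
      rw [hlm]
      simp only [outVal, zeroAt]
      by_cases hk : n' % w' = 0
      · simp only [if_pos hk, Bool.false_eq_true, if_false]
        congr 1
        push_cast
        ring
      · simp only [if_neg hk]
        have hz2 : (if (n' / w') % 2 = 0 then decide (n' % w' ≤ snakeIdx w' r t)
            else decide (snakeIdx w' r t < w' - n' % w')) = false := by
          split <;> rename_i hp <;> simp only [decide_eq_false_iff_not]
          · intro hcontra; exact hzero ⟨hk, by rw [if_pos hp]; exact hcontra⟩
          · intro hcontra; exact hzero ⟨hk, by rw [if_neg hp]; exact hcontra⟩
        simp only [hz2, Bool.false_eq_true, if_false]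
        congr 1
        push_cast
        ring

-- B returns the same value on found boxes
lemma alt_out (w' n' r t : Nat) (hw : 0 < w') (ht : t < w') (hlt : r * w' + t < n') :
    solution_alt (n' : Int) (w' : Int) (((r * w' + t : Nat) : Int) + 1) =
      outVal w' (n' / w') (n' % w') r (snakeIdx w' r t) := by
  simp only [solution_alt]
  rw [if_neg (by omega : ¬ (((r * w' + t : Nat) : Int) + 1 < 1 ∨ (n' : Int) < ((r * w' + t : Nat) : Int) + 1))]
  rw [PySem.Int.floordiv_natCast n' w', PySem.Int.mod_natCast n' w']
  rw [show ((r * w' + t : Nat) : Int) + 1 - 1 = ((r * w' + t : Nat) : Int) by ring]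
  rw [PySem.Int.floordiv_natCast (r * w' + t) w', PySem.Int.mod_natCast (r * w' + t) w']
  rw [rowcol_div w' r t hw ht, rowcol_mod w' r t ht]
  rw [show PySem.Int.mod ((r : Nat) : Int) 2 = ((r % 2 : Nat) : Int) from by
    exact_mod_cast PySem.Int.mod_natCast r 2]
  simp only [outVal, zeroAt, snakeIdx, Nat.cast_eq_zero]
  by_cases hk : n' % w' = 0 <;> by_cases hpr : r % 2 = 0 <;> by_cases hpf : (n' / w') % 2 = 0 <;>
    simp only [hk, hpr, hpf, if_true, if_false, ite_true, ite_false, if_pos, if_neg] <;>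
    norm_num <;>
    split_ifs <;>
    simp_all only [decide_eq_true_eq, decide_eq_false_iff_not, Option.some.injEq, not_lt, not_le] <;>
    omega

-- inside D_: A walks to its padding sentinel and reports depth 0
lemma zero_case (w' n' : Nat) (hw : 0 < w') (hn : 0 < n') (hk : n' % w' ≠ 0) :
    solution (n' : Int) (w' : Int) 0 = some 0 := by
  rw [solution_eq_search w' n' hw]
  have hmodn : w' * (n' / w') + n' % w' = n' := Nat.div_add_mod n' w'
  have hk0 : n' % w' < w' := Nat.mod_lt _ hw
  have hlast := last_warehouseOf w' n' hw hn
  rw [if_neg hk] at hlast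
  rw [hlast, len_warehouseOf w' n' hw]
  have hskip0 : ∀ rr ∈ (List.range (n' / w')).map (snakeRow w'), (0 : Int) ∉ rr := by
    intro rr hrr h0
    obtain ⟨r2, -, rfl⟩ := List.mem_map.mp hrr
    exact absurd (pos_of_mem_snakeRow h0) (by omega)
  rw [show warehouseOf w' n' = (List.range (n' / w')).map (snakeRow w') ++ [padRow w' (n' / w') (n' % w')]
      from by unfold warehouseOf; rw [if_neg hk]]
  rw [searchWh_skip_rows _ _ _ _ _ _ hskip0]
  have hrowz : ∃ pre post, padRow w' (n' / w') (n' % w') = pre ++ (0 : Int) :: post ∧ (0 : Int) ∉ pre := by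
    unfold padRow
    split
    · refine ⟨ascRow w' (n' / w') (n' % w'), List.replicate (w' - n' % w' - 1) 0, ?_, ?_⟩
      · rw [show w' - n' % w' = (w' - n' % w' - 1) + 1 from by omega, List.replicate_succ]
        norm_num
      · intro h0
        obtain ⟨j, -, hx⟩ := mem_ascRow.mp h0
        have : (0 : Int) < (((n' / w') * w' + j : Nat) : Int) + 1 := by positivity
        omega
    · refine ⟨[], List.replicate (w' - n' % w' - 1) 0 ++ (ascRow w' (n' / w') (n' % w')).reverse, ?_, by simp⟩
      rw [show w' - n' % w' = (w' - n' % w' - 1) + 1 from by omega, List.replicate_succ]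
      simp
  obtain ⟨pre, post, hrow, hpre⟩ := hrowz
  have hsr : ∀ tot i : Int,
      searchRow 0 (some (padRow w' (n' / w') (n' % w'))) tot i (padRow w' (n' / w') (n' % w')) 0
        = some (tot - i - 1) := by
    intro tot i
    rw [hrow, searchRow_found _ _ _ _ _ _ _ hpre]
    rw [if_pos (by
      rw [Option.bind_some, show (0 + pre.length : Nat) = pre.length from by omega,
        PySem.List.pyGet?_append_length])]
  rw [searchWh, hsr]
  simp only [if_neg hk]
  have hlm : (((List.range (n' / w')).map (snakeRow w')).length : Int) = ((n' / w' : Nat) : Int) := by simp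
  rw [hlm]
  congr 1
  push_cast
  ring

-- ===== VERDICT (by name: the statement is the Claim_ definition above) =====
theorem solution_spec : Claim_unchanged_solution := by
  intro n w num hdom hpre
  unfold Spec_solution
  intro hD
  by_cases hn : n ≤ 0
  · rw [nonpos_case n w num hn]
    simp only [solution_alt, if_pos (by omega : num < 1 ∨ n < num)]
  · push_neg at hn
    lift n to Nat using hn.le with n'
    have hn' : 0 < n' := by exact_mod_cast hn
    by_cases hw : (0 : Int) < w
    swap
    · have hrange : ¬ (1 ≤ num ∧ num ≤ (n' : Int)) := by
        rcases hpre with h | h | h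
        · exact absurd h hw
        · omega
        · omega
      rw [noposw_case n' hn' w num (by omega) hrange]
      simp only [solution_alt, if_pos (by omega : num < 1 ∨ (n' : Int) < num)]
    lift w to Nat using hw.le with w'
    have hw' : 0 < w' := by exact_mod_cast hw
    by_cases hfound : 1 ≤ num ∧ num ≤ (n' : Int)
    · obtain ⟨h1, h2⟩ := hfound
      set q := (num - 1).toNat with hq
      have hdm := Nat.div_add_mod q w'
      have hcm : q / w' * w' = w' * (q / w') := Nat.mul_comm _ _
      have hnum : num = ((q / w' * w' + q % w' : Nat) : Int) + 1 := by omega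
      have ht : q % w' < w' := Nat.mod_lt _ hw'
      have hlt : q / w' * w' + q % w' < n' := by omega
      rw [hnum, found_case w' n' (q / w') (q % w') hw' ht hlt,
        alt_out w' n' (q / w') (q % w') hw' ht hlt]
    · have hDk : n' % w' ≠ 0 → num ≠ 0 := by
        intro hk h0
        apply hD
        refine ⟨by exact_mod_cast hn, by exact_mod_cast hw, h0, ?_⟩
        intro hdvd
        rw [Int.natCast_dvd_natCast] at hdvd
        exact hk (Nat.dvd_iff_mod_eq_zero.mp hdvd)
      rw [notfound_case w' n' hw' hn' num hfound hDk]
      simp only [solution_alt, if_pos (by omega : num < 1 ∨ (n' : Int) < num)]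

theorem solution_changed : Claim_changed_solution := by unfold Claim_changed_solution; decide

theorem solution_tight : Claim_exact_solution := by
  intro n w num hdom hpre hD
  obtain ⟨hn, hw, rfl, hndvd⟩ := hD
  lift n to Nat using hn.le with n'
  lift w to Nat using hw.le with w'
  have hn' : 0 < n' := by exact_mod_cast hn
  have hw' : 0 < w' := by exact_mod_cast hw
  have hk : n' % w' ≠ 0 := by
    intro hmod
    exact hndvd (Int.natCast_dvd_natCast.mpr (Nat.dvd_of_mod_eq_zero hmod))
  rw [zero_case w' n' hw' hn' hk]
  simp only [solution_alt, if_pos (by omega : (0 : Int) < 1 ∨ (n' : Int) < 0)]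
  simp
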